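-- pv_equiv track=rewrite | github.com/aws-solutions-library-samples/guidance-for-medialake-on-aws | lambdas/nodes/audio_metadata_extractor/index.py | _should_be_duration_field
-- ===== SOURCE A (Python) =====
-- def _should_be_duration_field(field_name: str) -> bool:
--     """Check if a field should be treated as a duration (always float) based on patterns."""
--     # Convert field name to lowercase for comparison
--     field_lower = field_name.lower()
--
--     # Pattern-based detection for duration/time fields
--     duration_patterns = [
--         'duration', 'time', 'length', 'runtime',
--         'play', 'playback', 'total', 'media',
--         'stream', 'file', 'track'
--     ]
--
--     # Check if field name contains duration-related patterns
--     for pattern in duration_patterns: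
--         if pattern in field_lower:
--             # Additional check to ensure it's actually time-related
--             time_indicators = ['duration', 'time', 'length', '_ts', 'play', 'runtime']
--             if any(indicator in field_lower for indicator in time_indicators):
--                 return True
--
--     # Check for timestamp and time-specific suffixes
--     time_suffixes = ['_ts', '_time', '_duration', '_length', '_runtime']
--     return any(suffix in field_lower for suffix in time_suffixes)
-- ===== SOURCE B (Python) =====
-- def _should_be_duration_field(field_name: str) -> bool:
--     """Check if a field should be treated as a duration (always float) based on patterns."""
--     field_lower = field_name.lower()
--     return any(tok in field_lower for tok in ('duration', 'time', 'length', 'runtime', 'play', '_ts'))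
-- ===== Notes on version B (the rewrite author's own statement) =====
-- stated objective: simpler
-- what changed: Collapsed A's nested pattern-loop-with-indicator-check plus separate suffix scan into one flat membership scan over the six independent tokens (duration, time, length, runtime, play, _ts), which is provably the same predicate.
import Mathlib
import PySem

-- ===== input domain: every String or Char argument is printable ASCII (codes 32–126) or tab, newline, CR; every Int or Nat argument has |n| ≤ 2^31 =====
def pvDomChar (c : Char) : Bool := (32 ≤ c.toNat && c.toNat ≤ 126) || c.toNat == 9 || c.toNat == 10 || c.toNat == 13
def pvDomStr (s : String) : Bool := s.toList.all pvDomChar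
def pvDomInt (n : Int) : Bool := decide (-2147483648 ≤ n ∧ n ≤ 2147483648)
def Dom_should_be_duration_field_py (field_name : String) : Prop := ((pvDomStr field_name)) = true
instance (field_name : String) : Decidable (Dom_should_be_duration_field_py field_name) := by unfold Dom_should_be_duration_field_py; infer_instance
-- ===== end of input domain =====

-- B collapses A's nested pattern/indicator loop plus suffix scan into one flat
-- membership scan over the six independent tokens (objective: simpler).


-- ===== PORT A =====
-- the 'for pattern in duration_patterns' loop: returns true iff some iteration hit 'return True'
def pvALoop (field_lower : String) : List String → Bool
  | [] => false
  | p :: rest =>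
      if PySem.Str.isIn p field_lower then
        if ["duration", "time", "length", "_ts", "play", "runtime"].any
            (fun indicator => PySem.Str.isIn indicator field_lower) then
          true
        else pvALoop field_lower rest
      else pvALoop field_lower rest

def should_be_duration_field_py (field_name : String) : Bool :=
  let field_lower := PySem.Str.lower field_name
  if pvALoop field_lower
      ["duration", "time", "length", "runtime", "play", "playback", "total", "media",
       "stream", "file", "track"] then
    true
  else
    ["_ts", "_time", "_duration", "_length", "_runtime"].any
      (fun suffix => PySem.Str.isIn suffix field_lower)

-- ===== PORT B =====
def should_be_duration_field_py_alt (field_name : String) : Bool :=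
  let field_lower := PySem.Str.lower field_name
  ["duration", "time", "length", "runtime", "play", "_ts"].any
    (fun tok => PySem.Str.isIn tok field_lower)

-- ===== PRECONDITION & SPEC =====
def Spec_should_be_duration_field_py (field_name : String) (out : Bool) : Prop := out = should_be_duration_field_py_alt field_name
instance (field_name : String) (out : Bool) : Decidable (Spec_should_be_duration_field_py field_name out) := by unfold Spec_should_be_duration_field_py; infer_instance

-- ===== CLAIM (what is proved, stated in full; the proofs are below) =====
def Claim_equal_should_be_duration_field_py : Prop := ∀ (field_name : String), Dom_should_be_duration_field_py field_name → Spec_should_be_duration_field_py field_name (should_be_duration_field_py field_name)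

-- ===== LEMMAS AND PROOFS =====

-- a substring test for t succeeds whenever one for a superstring u of t does
theorem pvIsIn_of_infix {t u : String} (s : String) (h : t.toList <:+: u.toList)
    (hu : PySem.Str.isIn u s = true) : PySem.Str.isIn t s = true := by
  rw [PySem.Str.isIn_iff_infix] at hu ⊢
  exact h.trans hu

-- the pattern loop equals (some pattern present) && (some indicator present)
theorem pvALoop_eq (fl : String) (ps : List String) :
    pvALoop fl ps =
      (ps.any (fun p => PySem.Str.isIn p fl) &&
        ["duration", "time", "length", "_ts", "play", "runtime"].any
          (fun i => PySem.Str.isIn i fl)) := by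
  induction ps with
  | nil => simp [pvALoop]
  | cons p rest ih =>
      simp only [pvALoop, ih, List.any_cons]
      cases PySem.Str.isIn p fl <;>
        cases ["duration", "time", "length", "_ts", "play", "runtime"].any
          (fun i => PySem.Str.isIn i fl) <;> simp

-- ===== VERDICT (by name: the statement is the Claim_ definition above) =====
theorem should_be_duration_field_py_spec : Claim_equal_should_be_duration_field_py := by
  intro field_name _
  unfold Spec_should_be_duration_field_py should_be_duration_field_py should_be_duration_field_py_alt
  rw [Bool.eq_iff_iff]
  rw [show ∀ (b c : Bool), (if b then true else c) = (b || c) from by intro b c; cases b <;> simp]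
  set fl := PySem.Str.lower field_name with hfl
  simp only [pvALoop_eq, List.any_cons, List.any_nil, Bool.or_eq_true,
    Bool.and_eq_true, Bool.false_eq_true, or_false]
  constructor
  · rintro (⟨-, h⟩ | h)
    · rcases h with h | h | h | h | h | h
      · exact Or.inl h
      · exact Or.inr (Or.inl h)
      · exact Or.inr (Or.inr (Or.inl h))
      · exact Or.inr (Or.inr (Or.inr (Or.inr (Or.inr h))))
      · exact Or.inr (Or.inr (Or.inr (Or.inr (Or.inl h))))
      · exact Or.inr (Or.inr (Or.inr (Or.inl h)))
    · rcases h with h | h | h | h | h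
      · exact Or.inr (Or.inr (Or.inr (Or.inr (Or.inr h))))
      · exact Or.inr (Or.inl (pvIsIn_of_infix fl (by decide) h))
      · exact Or.inl (pvIsIn_of_infix fl (by decide) h)
      · exact Or.inr (Or.inr (Or.inl (pvIsIn_of_infix fl (by decide) h)))
      · exact Or.inr (Or.inr (Or.inr (Or.inl (pvIsIn_of_infix fl (by decide) h))))
  · rintro (h | h | h | h | h | h)
    · exact Or.inl ⟨Or.inl h, Or.inl h⟩
    · exact Or.inl ⟨Or.inr (Or.inl h), Or.inr (Or.inl h)⟩
    · exact Or.inl ⟨Or.inr (Or.inr (Or.inl h)), Or.inr (Or.inr (Or.inl h))⟩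
    · exact Or.inl ⟨Or.inr (Or.inr (Or.inr (Or.inl h))),
        Or.inr (Or.inr (Or.inr (Or.inr (Or.inr h))))⟩
    · exact Or.inl ⟨Or.inr (Or.inr (Or.inr (Or.inr (Or.inl h)))),
        Or.inr (Or.inr (Or.inr (Or.inr (Or.inl h))))⟩
    · exact Or.inr (Or.inl h)
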